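-- pv_equiv track=rewrite | github.com/clapanda/Mahjong-tile-recorder | new design/main_resnet.py | format_prediction_string
-- ===== SOURCE A (Python) =====
-- def format_prediction_string(predictions):
--     # 初始化存储每种类型牌的字典
--     sorted_tiles = {'m': [], 'p': [], 's': [], 'z': []}
--
--     # 将预测分组并存储在相应的列表中
--     for pred in predictions:
--         number = pred[:-1]
--         tile = pred[-1]
--         sorted_tiles[tile].extend(number)  # 将数字添加到相应的列表
--
--     # 对每种类型牌的数字进行排序
--     for tile in sorted_tiles:
--         sorted_tiles[tile] = ''.join(sorted(sorted_tiles[tile]))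
--
--     # 按照mpsz的顺序合并结果字符串
--     result_string = ''.join([sorted_tiles[tile] + tile for tile in 'mpsz' if sorted_tiles[tile]])
--     return result_string
-- ===== SOURCE B (Python) =====
-- def format_prediction_string(predictions):
--     # One flat pass: tag every digit char with its suit's mpsz-rank, sort once, then
--     # a single grouping sweep emits each non-empty suit's run followed by its letter.
--     order = {'m': 0, 'p': 1, 's': 2, 'z': 3}
--     pairs = []
--     for pred in predictions:
--         i = order[pred[-1]]
--         for ch in pred[:-1]:
--             pairs.append((i, ch))
--     pairs.sort()
--     parts = []
--     cur = None
--     buf = []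
--     for i, ch in pairs:
--         if i != cur:
--             if buf:
--                 parts.append(''.join(buf) + 'mpsz'[cur])
--             cur = i
--             buf = []
--         buf.append(ch)
--     if buf:
--         parts.append(''.join(buf) + 'mpsz'[cur])
--     return ''.join(parts)
-- ===== Notes on version B (the rewrite author's own statement) =====
-- stated objective: alternative
-- what changed: Instead of A's four per-suit dict buckets each sorted separately and concatenated, B tags every digit with its suit's mpsz-rank in one flat pass, sorts that flat list once lexicographically, and emits the result in a single grouping sweep over the sorted runs.
import Mathlib
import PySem

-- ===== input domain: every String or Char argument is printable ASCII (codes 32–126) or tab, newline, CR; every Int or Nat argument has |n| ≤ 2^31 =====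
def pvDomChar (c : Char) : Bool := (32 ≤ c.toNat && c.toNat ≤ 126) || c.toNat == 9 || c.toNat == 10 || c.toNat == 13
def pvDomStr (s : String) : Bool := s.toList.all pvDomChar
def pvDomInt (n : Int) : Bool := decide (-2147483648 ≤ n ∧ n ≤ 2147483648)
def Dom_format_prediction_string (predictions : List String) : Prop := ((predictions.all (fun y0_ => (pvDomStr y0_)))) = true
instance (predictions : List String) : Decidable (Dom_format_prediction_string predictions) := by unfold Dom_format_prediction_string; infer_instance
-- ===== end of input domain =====

-- B replaces A's four per-suit buckets (each sorted separately) by one flat tagged list,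
-- a single lexicographic sort and one grouping sweep; alternative decomposition, same cost.


-- ===== PORT A =====
-- The dict {'m':[], 'p':[], 's':[], 'z':[]} (fixed literal keys) is ported as a 4-field state.
def format_prediction_string (predictions : List String) : String :=
  let st := predictions.foldl (fun st pred =>
    let cs := pred.toList
    let number := cs.dropLast                -- pred[:-1]
    match PySem.List.pyGet? cs (-1) with     -- pred[-1]; none = IndexError, excluded by Pre_
    | none => st
    | some t =>
      if t = 'm' then (st.1 ++ number, st.2.1, st.2.2.1, st.2.2.2)
      else if t = 'p' then (st.1, st.2.1 ++ number, st.2.2.1, st.2.2.2)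
      else if t = 's' then (st.1, st.2.1, st.2.2.1 ++ number, st.2.2.2)
      else if t = 'z' then (st.1, st.2.1, st.2.2.1, st.2.2.2 ++ number)
      else st)                               -- KeyError, excluded by Pre_
    (([] : List Char), ([] : List Char), ([] : List Char), ([] : List Char))
  let sm := PySem.List.sorted st.1 (fun c => c) false
  let sp := PySem.List.sorted st.2.1 (fun c => c) false
  let ss := PySem.List.sorted st.2.2.1 (fun c => c) false
  let sz := PySem.List.sorted st.2.2.2 (fun c => c) false
  String.ofList ((if sm ≠ [] then sm ++ ['m'] else []) ++ (if sp ≠ [] then sp ++ ['p'] else []) ++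
             (if ss ≠ [] then ss ++ ['s'] else []) ++ (if sz ≠ [] then sz ++ ['z'] else []))

-- ===== PORT B =====
def pvOrder : PySem.Dict Char Int := PySem.Dict.ofList [('m', 0), ('p', 1), ('s', 2), ('z', 3)]

-- 'mpsz'[cur]; the 'x' default is unreachable: the sweep reads it only with buf ≠ [], when cur = some i, 0 ≤ i ≤ 3
def pvLetter (cur : Option Int) : Char :=
  (cur.bind (fun i => PySem.List.pyGet? ['m', 'p', 's', 'z'] i)).getD 'x'

-- the grouping 'for i, ch in pairs' sweep; parts holds the joined run strings as char lists
def pvSweep (cur : Option Int) (buf : List Char) (parts : List (List Char)) :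
    List (Int × Char) → List (List Char)
  | [] => if buf ≠ [] then parts ++ [buf ++ [pvLetter cur]] else parts
  | (i, ch) :: rest =>
    if some i ≠ cur then
      pvSweep (some i) [ch] (if buf ≠ [] then parts ++ [buf ++ [pvLetter cur]] else parts) rest
    else
      pvSweep cur (buf ++ [ch]) parts rest

def format_prediction_string_alt (predictions : List String) : String :=
  let pairs := predictions.foldl (fun acc pred =>
    let cs := pred.toList
    match PySem.List.pyGet? cs (-1) with       -- pred[-1]; none = IndexError, excluded by Pre_
    | none => acc
    | some t =>
      match PySem.Dict.get? pvOrder t with     -- order[pred[-1]]; none = KeyError, excluded by Pre_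
      | none => acc
      | some i => cs.dropLast.foldl (fun acc2 ch => acc2 ++ [(i, ch)]) acc)  -- for ch in pred[:-1]
    ([] : List (Int × Char))
  let sortedPairs := PySem.List.sorted2 pairs (fun p => p.1) (fun p => p.2) false  -- pairs.sort()
  String.ofList (pvSweep none [] [] sortedPairs).flatten                               -- ''.join(parts)

-- ===== PRECONDITION & SPEC =====
-- Pre_ excludes exactly the inputs on which A raises: a prediction that is empty (IndexError on
-- pred[-1]) or whose last character is not one of 'mpsz' (KeyError on the dict lookup).
def Pre_format_prediction_string (predictions : List String) : Prop :=
  ∀ pred ∈ predictions, (pred.toList.getLast?.getD ' ') ∈ (['m', 'p', 's', 'z'] : List Char)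
instance (predictions : List String) : Decidable (Pre_format_prediction_string predictions) := by
  unfold Pre_format_prediction_string; infer_instance

def pvWitness_format_prediction_string : List String := ["123m", "5z", "m"]

def Spec_format_prediction_string (predictions : List String) (out : String) : Prop :=
  out = format_prediction_string_alt predictions
instance (predictions : List String) (out : String) : Decidable (Spec_format_prediction_string predictions out) := by
  unfold Spec_format_prediction_string; infer_instance

-- ===== CLAIM (what is proved, stated in full; the proofs are below) =====
def Claim_equal_format_prediction_string : Prop := ∀ (predictions : List String), Dom_format_prediction_string predictions → Pre_format_prediction_string predictions → Spec_format_prediction_string predictions (format_prediction_string predictions)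

-- ===== LEMMAS AND PROOFS =====

-- ---- proof-side helpers ----

def pvBucket (t : Char) (l : List String) : List Char :=
  l.flatMap (fun pred => if pred.toList.getLast? = some t then pred.toList.dropLast else [])

def pvTag (pred : String) : Int :=
  if pred.toList.getLast?.getD ' ' = 'm' then 0
  else if pred.toList.getLast?.getD ' ' = 'p' then 1
  else if pred.toList.getLast?.getD ' ' = 's' then 2 else 3

def pvFlat (l : List String) : List (Int × Char) :=
  l.flatMap (fun pred => pred.toList.dropLast.map (Prod.mk (pvTag pred)))

def pvKey (p : Int × Char) : Int ×ₗ Char := toLex p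

def pvT (l : List String) : List (Int × Char) :=
  (PySem.List.sorted (pvBucket 'm' l) (fun c => c) false).map (Prod.mk 0) ++
  ((PySem.List.sorted (pvBucket 'p' l) (fun c => c) false).map (Prod.mk 1) ++
  ((PySem.List.sorted (pvBucket 's' l) (fun c => c) false).map (Prod.mk 2) ++
  (PySem.List.sorted (pvBucket 'z' l) (fun c => c) false).map (Prod.mk 3)))

lemma pvPre_head {pred : String}
    (h : (pred.toList.getLast?.getD ' ') ∈ (['m', 'p', 's', 'z'] : List Char)) :
    ∃ t, pred.toList.getLast? = some t ∧ (t = 'm' ∨ t = 'p' ∨ t = 's' ∨ t = 'z') := by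
  cases e : pred.toList.getLast? with
  | none => rw [e] at h; simp at h
  | some t => exact ⟨t, rfl, by rw [e] at h; simpa using h⟩

lemma pvFoldA' (l : List String) (h : Pre_format_prediction_string l) :
    ∀ (a b c d : List Char),
    l.foldl (fun st pred =>
      match pred.toList.getLast? with
      | none => st
      | some t =>
        if t = 'm' then (st.1 ++ pred.toList.dropLast, st.2.1, st.2.2.1, st.2.2.2)
        else if t = 'p' then (st.1, st.2.1 ++ pred.toList.dropLast, st.2.2.1, st.2.2.2)
        else if t = 's' then (st.1, st.2.1, st.2.2.1 ++ pred.toList.dropLast, st.2.2.2)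
        else if t = 'z' then (st.1, st.2.1, st.2.2.1, st.2.2.2 ++ pred.toList.dropLast)
        else st) (a, b, c, d)
      = (a ++ pvBucket 'm' l, b ++ pvBucket 'p' l, c ++ pvBucket 's' l, d ++ pvBucket 'z' l) := by
  induction l with
  | nil => intro a b c d; simp [pvBucket]
  | cons pred l ih =>
    have hh := h pred (by simp)
    have hl : Pre_format_prediction_string l := fun q hq => h q (by simp [hq])
    obtain ⟨t, e, ht⟩ := pvPre_head hh
    intro a b c d
    rw [List.foldl_cons]
    rcases ht with h1 | h1 | h1 | h1 <;> subst h1 <;>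
      simp only [e] <;> simp [ih hl, pvBucket, e, List.append_assoc]

lemma pvFoldA (l : List String) (h : Pre_format_prediction_string l) :
    ∀ (a b c d : List Char),
    l.foldl (fun st pred =>
      let cs := pred.toList
      let number := cs.dropLast
      match PySem.List.pyGet? cs (-1) with
      | none => st
      | some t =>
        if t = 'm' then (st.1 ++ number, st.2.1, st.2.2.1, st.2.2.2)
        else if t = 'p' then (st.1, st.2.1 ++ number, st.2.2.1, st.2.2.2)
        else if t = 's' then (st.1, st.2.1, st.2.2.1 ++ number, st.2.2.2)
        else if t = 'z' then (st.1, st.2.1, st.2.2.1, st.2.2.2 ++ number)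
        else st) (a, b, c, d)
      = (a ++ pvBucket 'm' l, b ++ pvBucket 'p' l, c ++ pvBucket 's' l, d ++ pvBucket 'z' l) := by
  intro a b c d
  refine Eq.trans (PySem.List.foldl_congr_mem l _
    (fun (st : List Char × List Char × List Char × List Char) (pred : String) =>
      match pred.toList.getLast? with
      | none => st
      | some t =>
        if t = 'm' then (st.1 ++ pred.toList.dropLast, st.2.1, st.2.2.1, st.2.2.2)
        else if t = 'p' then (st.1, st.2.1 ++ pred.toList.dropLast, st.2.2.1, st.2.2.2)
        else if t = 's' then (st.1, st.2.1, st.2.2.1 ++ pred.toList.dropLast, st.2.2.2)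
        else if t = 'z' then (st.1, st.2.1, st.2.2.1, st.2.2.2 ++ pred.toList.dropLast)
        else st) (a, b, c, d)
    (fun acc x _ => by simp [PySem.List.pyGet?_neg_one])) ?_
  exact pvFoldA' l h a b c d

lemma pvFoldB' (l : List String) (h : Pre_format_prediction_string l) :
    ∀ (acc : List (Int × Char)),
    l.foldl (fun acc pred =>
      match pred.toList.getLast? with
      | none => acc
      | some t =>
        match PySem.Dict.get? pvOrder t with
        | none => acc
        | some i => acc ++ pred.toList.dropLast.map (fun ch => (i, ch))) acc
      = acc ++ pvFlat l := by
  induction l with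
  | nil => intro acc; simp [pvFlat]
  | cons pred l ih =>
    have hh := h pred (by simp)
    have hl : Pre_format_prediction_string l := fun q hq => h q (by simp [hq])
    obtain ⟨t, e, ht⟩ := pvPre_head hh
    intro acc
    rw [List.foldl_cons, ih hl]
    rcases ht with h1 | h1 | h1 | h1 <;> subst h1 <;>
      simp [pvFlat, pvTag, e,
            (by decide : PySem.Dict.get? pvOrder 'm' = some 0),
            (by decide : PySem.Dict.get? pvOrder 'p' = some 1),
            (by decide : PySem.Dict.get? pvOrder 's' = some 2),
            (by decide : PySem.Dict.get? pvOrder 'z' = some 3),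
            List.append_assoc]

lemma pvFoldB (l : List String) (h : Pre_format_prediction_string l) :
    ∀ (acc : List (Int × Char)),
    l.foldl (fun acc pred =>
      let cs := pred.toList
      match PySem.List.pyGet? cs (-1) with
      | none => acc
      | some t =>
        match PySem.Dict.get? pvOrder t with
        | none => acc
        | some i => cs.dropLast.foldl (fun acc2 ch => acc2 ++ [(i, ch)]) acc) acc
      = acc ++ pvFlat l := by
  intro acc
  refine Eq.trans (PySem.List.foldl_congr_mem l _
    (fun (acc : List (Int × Char)) (pred : String) =>
      match pred.toList.getLast? with
      | none => acc
      | some t =>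
        match PySem.Dict.get? pvOrder t with
        | none => acc
        | some i => acc ++ pred.toList.dropLast.map (fun ch => (i, ch))) acc
    (fun acc x _ => by
      simp only [PySem.List.pyGet?_neg_one]
      cases hx : x.toList.getLast? with
      | none => simp
      | some t =>
        simp only [hx]
        cases hd : PySem.Dict.get? pvOrder t with
        | none => simp
        | some i =>
          simp only [hd]
          exact PySem.List.foldl_append_singleton_eq_map _ _ _)) ?_
  exact pvFoldB' l h acc

lemma pvPerm_middle {α : Type} (blk xs ys : List α) :
    (blk ++ (xs ++ ys)).Perm (xs ++ (blk ++ ys)) := by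
  have h := (List.perm_append_comm (l₁ := blk) (l₂ := xs)).append_right ys
  simpa [List.append_assoc] using h

lemma pvFlat_cons (p : String) (l : List String) :
    pvFlat (p :: l) = p.toList.dropLast.map (Prod.mk (pvTag p)) ++ pvFlat l := by
  simp [pvFlat]

lemma pvBucket_cons (t : Char) (p : String) (l : List String) :
    pvBucket t (p :: l)
      = (if p.toList.getLast? = some t then p.toList.dropLast else []) ++ pvBucket t l := by
  simp [pvBucket]

lemma pvFlat_perm (l : List String) (h : Pre_format_prediction_string l) :
    (pvFlat l).Perm
      ((pvBucket 'm' l).map (Prod.mk 0) ++ ((pvBucket 'p' l).map (Prod.mk 1) ++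
       ((pvBucket 's' l).map (Prod.mk 2) ++ (pvBucket 'z' l).map (Prod.mk 3)))) := by
  induction l with
  | nil => simp [pvFlat, pvBucket]
  | cons pred l ih =>
    have hh := h pred (by simp)
    have hl : Pre_format_prediction_string l := fun q hq => h q (by simp [hq])
    obtain ⟨t, e, ht⟩ := pvPre_head hh
    have bm := pvBucket_cons 'm' pred l
    have bp := pvBucket_cons 'p' pred l
    have bs2 := pvBucket_cons 's' pred l
    have bz := pvBucket_cons 'z' pred l
    rw [pvFlat_cons]
    rcases ht with h1 | h1 | h1 | h1
    · subst h1
      simp [e] at bm bp bs2 bz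
      have htag : pvTag pred = 0 := by simp [pvTag, e]
      rw [bm, bp, bs2, bz]
      simp only [htag, List.map_append, List.append_assoc]
      exact List.Perm.append_left _ (ih hl)
    · subst h1
      simp [e] at bm bp bs2 bz
      have htag : pvTag pred = 1 := by simp [pvTag, e]
      rw [bm, bp, bs2, bz]
      simp only [htag, List.map_append, List.append_assoc]
      exact (List.Perm.append_left _ (ih hl)).trans (pvPerm_middle _ _ _)
    · subst h1
      simp [e] at bm bp bs2 bz
      have htag : pvTag pred = 2 := by simp [pvTag, e]
      rw [bm, bp, bs2, bz]
      simp only [htag, List.map_append, List.append_assoc]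
      exact (List.Perm.append_left _ (ih hl)).trans
        ((pvPerm_middle _ _ _).trans (List.Perm.append_left _ (pvPerm_middle _ _ _)))
    · subst h1
      simp [e] at bm bp bs2 bz
      have htag : pvTag pred = 3 := by simp [pvTag, e]
      rw [bm, bp, bs2, bz]
      simp only [htag, List.map_append]
      exact (List.Perm.append_left _ (ih hl)).trans
        ((pvPerm_middle _ _ _).trans (List.Perm.append_left _
          ((pvPerm_middle _ _ _).trans (List.Perm.append_left _ (pvPerm_middle _ _ _)))))

lemma pvSorted2_pairwise (xs : List (Int × Char)) :
    (PySem.List.sorted2 xs (fun p => p.1) (fun p => p.2) false).Pairwise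
      (fun a b => pvKey a ≤ pvKey b) := by
  have hb : (fun (a b : Int × Char) =>
        decide (a.1 < b.1) || (!decide (b.1 < a.1) && decide (a.2 < b.2)))
      = (fun a b => decide (pvKey a < pvKey b)) := by
    funext a b
    by_cases h1 : a.1 < b.1 <;> by_cases h2 : b.1 < a.1 <;> by_cases h3 : a.2 < b.2 <;>
      simp [pvKey, Prod.Lex.lt_iff, h1, h2, h3] <;> omega
  show (List.foldl (fun acc x => PySem.List.insertBy
      (fun a b => decide (a.1 < b.1) || (!decide (b.1 < a.1) && decide (a.2 < b.2))) x acc)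
      [] xs).Pairwise (fun a b => pvKey a ≤ pvKey b)
  rw [hb]
  have H : ∀ acc : List (Int × Char), acc.Pairwise (fun a b => pvKey a ≤ pvKey b) →
      (List.foldl (fun acc x => PySem.List.insertBy
        (fun a b => decide (pvKey a < pvKey b)) x acc) acc xs).Pairwise
        (fun a b => pvKey a ≤ pvKey b) := by
    induction xs with
    | nil => intro acc hacc; exact hacc
    | cons x xs ih =>
      intro acc hacc
      exact ih _ (PySem.List.insertBy_pairwise_le pvKey x acc hacc)
  exact H [] (by simp)

lemma pvBlock_pairwise (k : Int) (cs : List Char) :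
    ((PySem.List.sorted cs (fun c => c) false).map (Prod.mk k)).Pairwise
      (fun a b => pvKey a ≤ pvKey b) := by
  refine List.Pairwise.map _ ?_ (PySem.List.sorted_pairwise cs (fun c => c))
  intro a b hab
  simp [pvKey, Prod.Lex.le_iff, hab]

lemma pvBlock_cross {k k' : Int} (hk : k < k') (cs cs' : List Char) :
    ∀ a ∈ cs.map (Prod.mk k), ∀ b ∈ cs'.map (Prod.mk k'), pvKey a ≤ pvKey b := by
  intro a ha b hb
  obtain ⟨c, -, rfl⟩ := List.mem_map.1 ha
  obtain ⟨c', -, rfl⟩ := List.mem_map.1 hb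
  simp [pvKey, Prod.Lex.le_iff, hk]

lemma pvT_pairwise (l : List String) :
    (pvT l).Pairwise (fun a b => pvKey a ≤ pvKey b) := by
  unfold pvT
  refine List.pairwise_append.2 ⟨pvBlock_pairwise 0 _, ?_, ?_⟩
  · refine List.pairwise_append.2 ⟨pvBlock_pairwise 1 _, ?_, ?_⟩
    · refine List.pairwise_append.2 ⟨pvBlock_pairwise 2 _, pvBlock_pairwise 3 _, ?_⟩
      · exact pvBlock_cross (by norm_num) _ _
    · intro a ha b hb
      rcases List.mem_append.1 hb with hb | hb
      · exact pvBlock_cross (by norm_num) _ _ a ha b hb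
      · exact pvBlock_cross (by norm_num) _ _ a ha b hb
  · intro a ha b hb
    rcases List.mem_append.1 hb with hb | hb
    · exact pvBlock_cross (by norm_num) _ _ a ha b hb
    rcases List.mem_append.1 hb with hb | hb
    · exact pvBlock_cross (by norm_num) _ _ a ha b hb
    · exact pvBlock_cross (by norm_num) _ _ a ha b hb

lemma pvSorted2_eq_T (l : List String) (h : Pre_format_prediction_string l) :
    PySem.List.sorted2 (pvFlat l) (fun p => p.1) (fun p => p.2) false = pvT l := by
  have hinj : Function.Injective pvKey := fun a b hab => by simpa [pvKey] using hab
  have hperm : (PySem.List.sorted2 (pvFlat l) (fun p => p.1) (fun p => p.2) false).Perm (pvT l) := by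
    refine (PySem.List.sorted2_perm _ _ _ _).trans ((pvFlat_perm l h).trans ?_)
    unfold pvT
    exact (((PySem.List.sorted_perm _ _ _).map (Prod.mk (0 : Int))).symm).append
      ((((PySem.List.sorted_perm _ _ _).map (Prod.mk (1 : Int))).symm).append
        ((((PySem.List.sorted_perm _ _ _).map (Prod.mk (2 : Int))).symm).append
          (((PySem.List.sorted_perm _ _ _).map (Prod.mk (3 : Int))).symm)))
  exact PySem.List.eq_of_perm_of_pairwise_le_of_injective pvKey hinj hperm
    (pvSorted2_pairwise _) (pvT_pairwise l)

lemma pvSweep_run (k : Int) (cs : List Char) :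
    ∀ (buf : List Char) (parts : List (List Char)) (rest : List (Int × Char)),
    pvSweep (some k) buf parts (cs.map (Prod.mk k) ++ rest)
      = pvSweep (some k) (buf ++ cs) parts rest := by
  induction cs with
  | nil => intro buf parts rest; simp
  | cons ch cs ih =>
    intro buf parts rest
    simp only [List.map_cons, List.cons_append, pvSweep]
    rw [if_neg (by simp)]
    rw [ih (buf ++ [ch]) parts rest]
    simp

lemma pvSweep_blocks (bs : List (Int × List Char)) (hne : ∀ b ∈ bs, b.2 ≠ [])
    (hdist : bs.Pairwise (fun x y => x.1 ≠ y.1)) :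
    ∀ (cur : Option Int) (buf : List Char) (parts : List (List Char)),
    (∀ b ∈ bs, some b.1 ≠ cur) →
    pvSweep cur buf parts (bs.flatMap (fun b => b.2.map (Prod.mk b.1)))
      = (if buf ≠ [] then parts ++ [buf ++ [pvLetter cur]] else parts) ++
        bs.map (fun b => b.2 ++ [pvLetter (some b.1)]) := by
  induction bs with
  | nil => intro cur buf parts _; simp [pvSweep]
  | cons b bs ih =>
    obtain ⟨k, cs⟩ := b
    intro cur buf parts hcur
    have hcs : cs ≠ [] := hne (k, cs) (by simp)
    cases cs with
    | nil => exact absurd rfl hcs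
    | cons ch cs' =>
      have hne' : ∀ b ∈ bs, b.2 ≠ [] := fun b hb => hne b (by simp [hb])
      have hdist' : bs.Pairwise (fun x y => x.1 ≠ y.1) := (List.pairwise_cons.1 hdist).2
      have hhead : ∀ b ∈ bs, (k, ch :: cs').1 ≠ b.1 := (List.pairwise_cons.1 hdist).1
      simp only [List.flatMap_cons, List.map_cons, List.cons_append]
      simp only [pvSweep]
      rw [if_pos (hcur (k, ch :: cs') (by simp))]
      rw [pvSweep_run k cs' [ch] _ _]
      simp only [List.singleton_append]
      rw [ih hne' hdist' (some k) (ch :: cs') _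
        (fun b hb => by simpa using (hhead b hb).symm)]
      simp [List.append_assoc]

lemma pvFlatMap_filter_nonempty (bs : List (Int × List Char)) :
    (bs.filter (fun b => !decide (b.2 = []))).flatMap (fun b => b.2.map (Prod.mk b.1))
      = bs.flatMap (fun b => b.2.map (Prod.mk b.1)) := by
  induction bs with
  | nil => rfl
  | cons b bs ih =>
    by_cases hb : b.2 = []
    · simp [hb, ih]
    · simp [hb, ih]


lemma pvLetter_vals : pvLetter (some 0) = 'm' ∧ pvLetter (some 1) = 'p' ∧
    pvLetter (some 2) = 's' ∧ pvLetter (some 3) = 'z' := by decide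

lemma pvFinal (sm sp ss sz : List Char) :
    (pvSweep none [] [] ((sm.map (Prod.mk 0)) ++ ((sp.map (Prod.mk 1)) ++
        ((ss.map (Prod.mk 2)) ++ (sz.map (Prod.mk 3)))))).flatten
      = (if sm ≠ [] then sm ++ ['m'] else []) ++ (if sp ≠ [] then sp ++ ['p'] else []) ++
        (if ss ≠ [] then ss ++ ['s'] else []) ++ (if sz ≠ [] then sz ++ ['z'] else []) := by
  have hflat : (sm.map (Prod.mk (0 : Int))) ++ ((sp.map (Prod.mk 1)) ++
        ((ss.map (Prod.mk 2)) ++ (sz.map (Prod.mk 3))))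
      = ([((0 : Int), sm), (1, sp), (2, ss), (3, sz)].filter
          (fun b => !decide (b.2 = []))).flatMap (fun b => b.2.map (Prod.mk b.1)) := by
    rw [pvFlatMap_filter_nonempty]; simp
  rw [hflat]
  rw [pvSweep_blocks _ ?hne ?hdist none [] [] ?hcur]
  case hne => intro b hb; simpa using (List.mem_filter.1 hb).2
  case hdist =>
    refine List.Pairwise.sublist (List.filter_sublist) ?_
    simp [List.pairwise_cons]
  case hcur => intro b _; simp
  obtain ⟨hL0, hL1, hL2, hL3⟩ := pvLetter_vals
  by_cases h0 : sm = [] <;> by_cases h1 : sp = [] <;> by_cases h2 : ss = [] <;>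
    by_cases h3 : sz = [] <;>
    simp [h0, h1, h2, h3, List.filter, hL0, hL1, hL2, hL3, List.append_assoc]

-- ===== VERDICT (by name: the statement is the Claim_ definition above) =====
theorem format_prediction_string_spec : Claim_equal_format_prediction_string := by
  unfold Claim_equal_format_prediction_string
  intro l _ hpre
  unfold Spec_format_prediction_string
  show format_prediction_string l = format_prediction_string_alt l
  unfold format_prediction_string format_prediction_string_alt
  rw [pvFoldA l hpre [] [] [] [], pvFoldB l hpre []]
  simp only [List.nil_append]
  rw [pvSorted2_eq_T l hpre]
  exact (congrArg String.ofList (pvFinal _ _ _ _)).symm
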